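-- pv_equiv track=rewrite | github.com/shion24hub/compp | abc/196/c.py | to_base10
-- ===== SOURCE A (Python) =====
-- def to_base10 (n : int, k : int) -> int:
--     digits = []
--     while n >= 1 :
--         digits.append(n % 10)
--         n //= 10
--     ret = 0
--     for i in range(len(digits)) :
--         ret += (k ** i) * digits[i]
--
--     return ret
-- ===== SOURCE B (Python) =====
-- def to_base10(n: int, k: int) -> int:
--     if n < 1:
--         return 0
--     return to_base10(n // 10, k) * k + n % 10
-- ===== Notes on version B (the rewrite author's own statement) =====
-- stated objective: alternative
-- what changed: A's two-pass scheme (build a digit list, then sum k**i * digits[i] with exponentiation) is replaced by a single direct recursion with no list at all: to_base10(n//10,k)*k + n%10 (Horner's rule on the structure of n).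
import Mathlib
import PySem

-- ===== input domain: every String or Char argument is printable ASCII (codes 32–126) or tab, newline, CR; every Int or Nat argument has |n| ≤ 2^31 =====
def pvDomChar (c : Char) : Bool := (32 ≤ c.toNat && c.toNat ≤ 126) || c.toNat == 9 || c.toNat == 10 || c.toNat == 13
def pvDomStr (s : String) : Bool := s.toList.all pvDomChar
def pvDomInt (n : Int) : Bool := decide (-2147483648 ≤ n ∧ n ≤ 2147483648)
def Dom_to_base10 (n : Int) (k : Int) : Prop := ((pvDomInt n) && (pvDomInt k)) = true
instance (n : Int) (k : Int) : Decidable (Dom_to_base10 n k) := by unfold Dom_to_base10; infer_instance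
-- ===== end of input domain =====

-- B replaces A's two-pass scheme (digit list, then a k**i power sum) by a single direct
-- recursion with no list: to_base10(n//10,k)*k + n%10 (objective: alternative).

-- ===== PORT A =====
-- 'digits = []; while n >= 1: digits.append(n % 10); n //= 10'
def pvDigits (n : Int) : List Int :=
  if n ≥ 1 then
    PySem.Int.mod n 10 :: pvDigits (PySem.Int.floordiv n 10)
  else []
termination_by n.toNat
decreasing_by
  have h10 : (0:Int) < 10 := by norm_num
  have := PySem.Int.floordiv_eq_ediv_of_pos (a := n) h10
  rw [this]
  omega

-- 'for i in range(len(digits)): ret += (k ** i) * digits[i]'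
def to_base10 (n : Int) (k : Int) : Int :=
  (List.range (pvDigits n).length).foldl
    (fun ret i => ret + k ^ i * (pvDigits n).getD i 0) 0

-- ===== PORT B =====
-- 'if n < 1: return 0; return to_base10(n // 10, k) * k + n % 10'
def to_base10_alt (n : Int) (k : Int) : Int :=
  if n < 1 then 0
  else to_base10_alt (PySem.Int.floordiv n 10) k * k + PySem.Int.mod n 10
termination_by n.toNat
decreasing_by
  have h10 : (0:Int) < 10 := by norm_num
  have := PySem.Int.floordiv_eq_ediv_of_pos (a := n) h10
  rw [this]
  omega

-- ===== PRECONDITION & SPEC =====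
def Spec_to_base10 (n : Int) (k : Int) (out : Int) : Prop := out = to_base10_alt n k
instance (n : Int) (k : Int) (out : Int) : Decidable (Spec_to_base10 n k out) := by unfold Spec_to_base10; infer_instance

-- ===== CLAIM (what is proved, stated in full; the proofs are below) =====
def Claim_equal_to_base10 : Prop := ∀ (n : Int) (k : Int), Dom_to_base10 n k → Spec_to_base10 n k (to_base10 n k)

-- ===== LEMMAS AND PROOFS =====

-- A's accumulation loop is the sum of its per-index contributions
theorem foldl_add_map (f : Nat → Int) (l : List Nat) (a : Int) :
    l.foldl (fun ret i => ret + f i) a = a + (l.map f).sum := by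
  induction l generalizing a with
  | nil => simp
  | cons x xs ih => simp [List.foldl_cons, ih, add_assoc]

-- the power sum over any digit list equals the right-fold (Horner) evaluation
theorem powsum_eq_foldr (k : Int) (ds : List Int) :
    ((List.range ds.length).map (fun i => k ^ i * ds.getD i 0)).sum
      = ds.foldr (fun d r => r * k + d) 0 := by
  induction ds with
  | nil => simp
  | cons d ds ih =>
    have hmap : ((List.range ds.length).map Nat.succ).map
          (fun i => k ^ i * (d :: ds).getD i 0)
        = (List.range ds.length).map (fun i => k * (k ^ i * ds.getD i 0)) := by
      rw [List.map_map]
      exact List.map_congr_left (fun i _ => by simp [pow_succ]; ring)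
    rw [List.length_cons, List.range_succ_eq_map, List.map_cons, hmap,
      List.sum_cons, List.sum_map_mul_left, ih]
    simp [List.foldr]; ring

-- B's direct recursion computes the same right-fold over A's digit list
theorem alt_eq_foldr (n k : Int) :
    to_base10_alt n k = (pvDigits n).foldr (fun d r => r * k + d) 0 := by
  rw [to_base10_alt, pvDigits]
  by_cases h : n < 1
  · rw [if_pos h, if_neg (by omega)]
    simp
  · rw [if_neg h, if_pos (by omega)]
    have := alt_eq_foldr (PySem.Int.floordiv n 10) k
    simp only [List.foldr_cons]
    rw [this]
termination_by n.toNat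
decreasing_by
  have h10 : (0:Int) < 10 := by norm_num
  have := PySem.Int.floordiv_eq_ediv_of_pos (a := n) h10
  rw [this]
  omega

-- ===== VERDICT (by name: the statement is the Claim_ definition above) =====
theorem to_base10_spec : Claim_equal_to_base10 := by
  intro n k _
  unfold Spec_to_base10 to_base10
  rw [foldl_add_map (fun i => k ^ i * (pvDigits n).getD i 0), powsum_eq_foldr, alt_eq_foldr]
  simp
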